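-- pv_equiv track=rewrite | github.com/yangpuhai/STN4DST | utils/WOZ_data_utils.py | process_uttr
-- ===== SOURCE A (Python) =====
-- def process_uttr(uttr):
--     result = []
--     for s in uttr.split():
--         s1 = s
--         if s[-1] in ['.', '!', ',', '?']:
--             s1 = s[:-1] + ' ' + s[-1]
--         result.append(s1)
--     return ' '.join(result)
-- ===== SOURCE B (Python) =====
-- def process_uttr(uttr):
--     # one char-level pass over the whitespace-normalized string:
--     # a space is inserted before any '.', '!', ',', '?' that ends a token
--     # (i.e. whose following character is a space, or which ends the string).
--     s = ' '.join(uttr.split())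
--     out = []
--     for c, nxt in zip(s, s[1:] + ' '):
--         if c in '.!,?' and nxt == ' ':
--             out.append(' ')
--         out.append(c)
--     return ''.join(out)
-- ===== Notes on version B (the rewrite author's own statement) =====
-- stated objective: alternative
-- what changed: Replaces the per-token loop (split, test the token's last char, slice and rebuild each token, join) by whitespace normalization via ' '.join(uttr.split()) followed by a single character-level pass that inserts a space before each '.!,?' whose next character is a space or end of string.
import Mathlib
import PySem

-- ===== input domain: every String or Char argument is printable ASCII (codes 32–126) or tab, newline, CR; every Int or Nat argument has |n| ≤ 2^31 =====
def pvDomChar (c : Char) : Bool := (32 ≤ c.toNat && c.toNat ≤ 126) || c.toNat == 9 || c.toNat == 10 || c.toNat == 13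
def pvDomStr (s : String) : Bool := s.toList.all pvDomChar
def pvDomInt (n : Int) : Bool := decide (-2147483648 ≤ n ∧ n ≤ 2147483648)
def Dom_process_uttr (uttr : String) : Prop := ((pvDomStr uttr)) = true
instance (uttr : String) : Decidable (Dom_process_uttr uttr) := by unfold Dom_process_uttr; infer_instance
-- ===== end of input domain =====

-- B replaces A's per-token slice-and-rebuild loop by a single character-level pass
-- over the whitespace-normalized string (objective: alternative, same cost).

-- ===== PORT A =====
-- loop body of A: s1 = s[:-1] + ' ' + s[-1] if s[-1] in ['.','!',',','?'] else s
-- (the 'none' branch is where Python's s[-1] would raise IndexError; split() never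
--  yields an empty token, so it is unreachable and A is total)
def pvFixTok (s : List Char) : List Char :=
  match PySem.List.pyGet? s (-1) with
  | some c =>
      if c ∈ ['.', '!', ',', '?'] then PySem.List.slice s none (some (-1)) ++ [' '] ++ [c]
      else s
  | none => s

def process_uttr (uttr : String) : String :=
  let result := (PySem.Chars.split₀ uttr.toList).foldl (fun result s => result ++ [pvFixTok s]) []
  String.ofList (PySem.Chars.join [' '] result)

-- ===== PORT B =====
-- the loop 'for c, nxt in zip(s, s[1:] + " ")' of Source B: nxt is the next character,
-- or the padded ' ' sentinel at the end of the string
def pvScan : List Char → List Char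
  | [] => []
  | [c] => if c ∈ ['.', '!', ',', '?'] then [' ', c] else [c]
  | c :: d :: rest => (if c ∈ ['.', '!', ',', '?'] ∧ d = ' ' then [' ', c] else [c]) ++ pvScan (d :: rest)

def process_uttr_alt (uttr : String) : String :=
  let s := PySem.Chars.join [' '] (PySem.Chars.split₀ uttr.toList)
  String.ofList (pvScan s)

-- ===== PRECONDITION & SPEC =====
def Spec_process_uttr (uttr : String) (out : String) : Prop := out = process_uttr_alt uttr
instance (uttr : String) (out : String) : Decidable (Spec_process_uttr uttr out) := by unfold Spec_process_uttr; infer_instance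

-- ===== CLAIM (what is proved, stated in full; the proofs are below) =====
def Claim_equal_process_uttr : Prop := ∀ (uttr : String), Dom_process_uttr uttr → Spec_process_uttr uttr (process_uttr uttr)

-- ===== LEMMAS AND PROOFS =====

-- a "good" token: nonempty and free of whitespace — what uttr.split() produces
def pvGood (t : List Char) : Prop := t ≠ [] ∧ ∀ c ∈ t, PySem.Chars.isspace c = false

theorem pvSplit_go_good (s : List Char) : ∀ (cur : List Char) (acc : List (List Char)),
    (∀ t ∈ acc, pvGood t) → (∀ c ∈ cur, PySem.Chars.isspace c = false) →
    ∀ t ∈ PySem.Chars.split₀.go s cur acc, pvGood t := by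
  induction s with
  | nil =>
      intro cur acc hacc hcur t ht
      unfold PySem.Chars.split₀.go at ht
      by_cases hc : cur.isEmpty = true
      · simp [hc] at ht; exact hacc t ht
      · simp [hc] at ht
        rcases ht with h | h
        · exact hacc t h
        · subst h
          refine ⟨by simpa using (List.isEmpty_eq_false_iff.mp (by simp [hc])), ?_⟩
          intro c hc'; exact hcur c (List.mem_reverse.mp hc')
  | cons c rest ih =>
      intro cur acc hacc hcur t ht
      unfold PySem.Chars.split₀.go at ht
      by_cases hsp : PySem.Chars.isspace c = true
      · by_cases hc : cur.isEmpty = true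
        · simp [hsp, hc] at ht
          exact ih [] acc hacc (by simp) t ht
        · simp [hsp, hc] at ht
          refine ih [] (cur.reverse :: acc) ?_ (by simp) t ht
          intro u hu
          rcases List.mem_cons.mp hu with h | h
          · subst h
            refine ⟨by simpa using (List.isEmpty_eq_false_iff.mp (by simp [hc])), ?_⟩
            intro x hx; exact hcur x (List.mem_reverse.mp hx)
          · exact hacc u h
      · simp [hsp] at ht
        refine ih (c :: cur) acc hacc ?_ t ht
        intro x hx
        rcases List.mem_cons.mp hx with h | h
        · subst h; simpa using hsp
        · exact hcur x h

theorem pvSplit_good (l : List Char) : ∀ t ∈ PySem.Chars.split₀ l, pvGood t := by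
  unfold PySem.Chars.split₀
  exact pvSplit_go_good l [] [] (by simp) (by simp)

theorem pvPyGet_neg_one (l : List Char) : PySem.List.pyGet? l (-1) = l.getLast? := by
  simp [PySem.List.pyGet?, PySem.List.pyIdx?]
  rcases l with _ | ⟨a, t⟩
  · simp
  · simp [List.getLast?_eq_getElem?]

theorem pvFixTok_cons (c : Char) (t : List Char) (h : t ≠ []) :
    pvFixTok (c :: t) = c :: pvFixTok t := by
  rcases t with _ | ⟨d, rest⟩
  · exact absurd rfl h
  unfold pvFixTok
  rw [pvPyGet_neg_one, pvPyGet_neg_one, List.getLast?_cons_cons]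
  rcases hq : (d :: rest).getLast? with _ | a
  · simp at hq
  by_cases hp : a ∈ ['.', '!', ',', '?']
  · simp only [hp, if_pos]
    rw [PySem.List.slice_to_neg_one, PySem.List.slice_to_neg_one, List.dropLast_cons₂]
    simp
  · simp [hp]

theorem pvScan_space_cons (r : List Char) : pvScan (' ' :: r) = ' ' :: pvScan r := by
  rcases r with _ | ⟨d, rest⟩ <;> simp [pvScan]

theorem pvScan_good (t : List Char) (hg : pvGood t) : pvScan t = pvFixTok t := by
  induction t with
  | nil => exact absurd rfl hg.1
  | cons c tl ih =>
      rcases tl with _ | ⟨d, rest⟩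
      · -- singleton token
        unfold pvFixTok
        rw [pvPyGet_neg_one]
        simp only [List.getLast?_singleton]
        by_cases hp : c ∈ ['.', '!', ',', '?']
        · simp [pvScan, hp, PySem.List.slice_to_neg_one]
        · simp [pvScan, hp]
      · have hd : d ≠ ' ' := by
          intro h
          have := hg.2 d (by simp [h]); rw [h] at this; simp [PySem.Chars.isspace] at this
        have : pvScan (c :: d :: rest) = c :: pvScan (d :: rest) := by
          simp [pvScan, hd]
        rw [this, ih ⟨by simp, fun x hx => hg.2 x (List.mem_cons_of_mem c hx)⟩,
            pvFixTok_cons c (d :: rest) (by simp)]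

theorem pvScan_tok_space (t : List Char) (hg : pvGood t) (r : List Char) :
    pvScan (t ++ ' ' :: r) = pvFixTok t ++ ' ' :: pvScan r := by
  induction t with
  | nil => exact absurd rfl hg.1
  | cons c tl ih =>
      rcases tl with _ | ⟨d, rest⟩
      · -- singleton token followed by the separating space
        have h1 : pvScan ([c] ++ ' ' :: r) = (if c ∈ ['.', '!', ',', '?'] then [' ', c] else [c]) ++ pvScan (' ' :: r) := by
          by_cases hp : c ∈ ['.', '!', ',', '?'] <;> simp [pvScan, hp]
        rw [h1, pvScan_space_cons]
        unfold pvFixTok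
        rw [pvPyGet_neg_one]
        simp only [List.getLast?_singleton]
        by_cases hp : c ∈ ['.', '!', ',', '?']
        · simp [hp, PySem.List.slice_to_neg_one]
        · simp [hp]
      · have hd : d ≠ ' ' := by
          intro h
          have := hg.2 d (by simp [h]); rw [h] at this; simp [PySem.Chars.isspace] at this
        have h1 : pvScan ((c :: d :: rest) ++ ' ' :: r) = c :: pvScan ((d :: rest) ++ ' ' :: r) := by
          simp [pvScan, hd]
        rw [h1, ih ⟨by simp, fun x hx => hg.2 x (List.mem_cons_of_mem c hx)⟩,
            pvFixTok_cons c (d :: rest) (by simp)]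
        simp

theorem pvScan_join (ts : List (List Char)) (h : ∀ t ∈ ts, pvGood t) :
    pvScan (PySem.Chars.join [' '] ts) = PySem.Chars.join [' '] (ts.map pvFixTok) := by
  induction ts with
  | nil => simp [PySem.Chars.join_nil, pvScan]
  | cons t rest ih =>
      rcases rest with _ | ⟨t', r⟩
      · simp only [List.map, PySem.Chars.join_singleton]
        exact pvScan_good t (h t (by simp))
      · rw [PySem.Chars.join_cons_cons]
        have : t ++ [' '] ++ PySem.Chars.join [' '] (t' :: r) = t ++ ' ' :: PySem.Chars.join [' '] (t' :: r) := by simp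
        rw [this, pvScan_tok_space t (h t (by simp)),
            ih (fun u hu => h u (List.mem_cons_of_mem t hu))]
        simp only [List.map, PySem.Chars.join_cons_cons]
        simp

-- ===== VERDICT (by name: the statement is the Claim_ definition above) =====
theorem process_uttr_spec : Claim_equal_process_uttr := by
  intro uttr _
  unfold Spec_process_uttr process_uttr process_uttr_alt
  rw [PySem.List.foldl_append_singleton_eq_map]
  simp only [List.nil_append]
  exact congrArg String.ofList (pvScan_join (PySem.Chars.split₀ uttr.toList) (pvSplit_good uttr.toList)).symm
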